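-- pv_equiv track=rewrite | github.com/Nick-Stewart7/Davis-Putnam-Solver | main.py | SameSignedLiteral
-- ===== SOURCE A (Python) =====
-- def SameSignedLiteral(atoms, S):
-- 	for atom in atoms:
-- 		atomPresent = False
-- 		onlyTrue = True
-- 		onlyFalse = True
-- 		for clause in S:
-- 				for literal in clause:
-- 					if abs(literal) == atom:
-- 						atomPresent = True
-- 						if literal > 0:
-- 							onlyFalse = False
-- 						if literal < 0:
-- 							onlyTrue = False
--
-- 		if onlyTrue and atomPresent:
-- 			return (atom,1)
-- 		if onlyFalse and atomPresent:
-- 			return (atom,-1)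
-- 	return None
-- ===== SOURCE B (Python) =====
-- def SameSignedLiteral(atoms, S):
--     pos = set()
--     neg = set()
--     present = set()
--     for clause in S:
--         for literal in clause:
--             present.add(abs(literal))
--             if literal > 0:
--                 pos.add(literal)
--             elif literal < 0:
--                 neg.add(-literal)
--     for atom in atoms:
--         if atom in present:
--             if atom not in neg:
--                 return (atom, 1)
--             if atom not in pos:
--                 return (atom, -1)
--     return None
-- ===== Notes on version B (the rewrite author's own statement) =====
-- stated objective: faster
-- what changed: B scans the clause set once, recording each atom's positive and negative occurrences in hash sets, then scans atoms with O(1) lookups instead of re-scanning every clause for every atom.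
import Mathlib
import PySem

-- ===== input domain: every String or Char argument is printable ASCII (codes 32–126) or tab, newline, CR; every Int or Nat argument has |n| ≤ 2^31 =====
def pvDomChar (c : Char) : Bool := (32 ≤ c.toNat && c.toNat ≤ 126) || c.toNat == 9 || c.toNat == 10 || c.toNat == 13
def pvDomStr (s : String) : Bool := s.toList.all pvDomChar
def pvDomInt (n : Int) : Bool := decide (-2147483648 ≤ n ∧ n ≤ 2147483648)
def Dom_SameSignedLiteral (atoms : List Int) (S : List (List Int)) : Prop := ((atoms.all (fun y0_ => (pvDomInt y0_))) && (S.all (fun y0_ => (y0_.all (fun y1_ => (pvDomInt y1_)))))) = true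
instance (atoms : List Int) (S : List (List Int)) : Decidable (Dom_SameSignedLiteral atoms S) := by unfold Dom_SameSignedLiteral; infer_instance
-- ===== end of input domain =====

-- B replaces A's per-atom rescan of all clauses with a single pass that records each
-- atom's positive/negative occurrences in sets, then an O(1)-lookup scan over atoms (faster, asymptotic).

-- ===== PORT A =====
-- state = (atomPresent, onlyTrue, onlyFalse); inner double loop over S, then the two checks, per atom
def pvScanA (atom : Int) (S : List (List Int)) : Bool × Bool × Bool :=
  S.foldl (fun st clause =>
    clause.foldl (fun st literal =>
      if |literal| = atom then
        (true,
         if literal < 0 then false else st.2.1,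
         if literal > 0 then false else st.2.2)
      else st) st) (false, true, true)

def SameSignedLiteral (atoms : List Int) (S : List (List Int)) : Option (List Int) :=
  match atoms with
  | [] => none
  | atom :: rest =>
    let st := pvScanA atom S
    if st.2.1 && st.1 then some [atom, 1]
    else if st.2.2 && st.1 then some [atom, -1]
    else SameSignedLiteral rest S

-- ===== PORT B =====
-- one pass over S building (present, pos, neg) sets, then a scan over atoms with set lookups
def pvBuildB (S : List (List Int)) : PySem.Set Int × PySem.Set Int × PySem.Set Int :=
  S.foldl (fun sets clause =>
    clause.foldl (fun sets literal =>
      (PySem.Set.add sets.1 |literal|,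
       if literal > 0 then PySem.Set.add sets.2.1 literal else sets.2.1,
       if literal < 0 then PySem.Set.add sets.2.2 (-literal) else sets.2.2)) sets) ([], [], [])

def pvLookupB (sets : PySem.Set Int × PySem.Set Int × PySem.Set Int) : List Int → Option (List Int)
  | [] => none
  | atom :: rest =>
    if PySem.Set.contains sets.1 atom then
      if !PySem.Set.contains sets.2.2 atom then some [atom, 1]
      else if !PySem.Set.contains sets.2.1 atom then some [atom, -1]
      else pvLookupB sets rest
    else pvLookupB sets rest

def SameSignedLiteral_alt (atoms : List Int) (S : List (List Int)) : Option (List Int) :=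
  pvLookupB (pvBuildB S) atoms

-- ===== PRECONDITION & SPEC =====
def Spec_SameSignedLiteral (atoms : List Int) (S : List (List Int)) (out : Option (List Int)) : Prop := out = SameSignedLiteral_alt atoms S
instance (atoms : List Int) (S : List (List Int)) (out : Option (List Int)) : Decidable (Spec_SameSignedLiteral atoms S out) := by unfold Spec_SameSignedLiteral; infer_instance

-- ===== CLAIM (what is proved, stated in full; the proofs are below) =====
def Claim_equal_SameSignedLiteral : Prop := ∀ (atoms : List Int) (S : List (List Int)), Dom_SameSignedLiteral atoms S → Spec_SameSignedLiteral atoms S (SameSignedLiteral atoms S)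

-- ===== LEMMAS AND PROOFS =====

-- A's scan over the flattened literal list, characterised by any/all predicates
theorem pvScanA_flat (atom : Int) (L : List Int) (st : Bool × Bool × Bool) :
    L.foldl (fun st literal =>
      if |literal| = atom then
        (true,
         if literal < 0 then false else st.2.1,
         if literal > 0 then false else st.2.2)
      else st) st
    = (st.1 || L.any (fun l => |l| == atom),
       st.2.1 && !L.any (fun l => |l| == atom && decide (l < 0)),
       st.2.2 && !L.any (fun l => |l| == atom && decide (l > 0))) := by
  induction L generalizing st with
  | nil => simp
  | cons l L ih =>
    simp only [List.foldl_cons, List.any_cons, ih]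
    by_cases h : |l| = atom
    · rcases lt_trichotomy l 0 with hl | hl | hl
      · simp [h, hl, not_lt_of_gt hl]
      · subst hl; simp [h]
      · simp [h, hl, not_lt_of_gt hl]
    · have hb : (|l| == atom) = false := by simp [h]
      simp [if_neg h, hb]

theorem pvScanA_spec (atom : Int) (S : List (List Int)) :
    pvScanA atom S
    = ((S.flatten).any (fun l => |l| == atom),
       !(S.flatten).any (fun l => |l| == atom && decide (l < 0)),
       !(S.flatten).any (fun l => |l| == atom && decide (l > 0))) := by
  unfold pvScanA
  rw [← List.foldl_flatten, pvScanA_flat]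
  simp

-- B's build over the flattened literal list: membership of each component
theorem pvBuildB_flat (L : List Int) (s : PySem.Set Int × PySem.Set Int × PySem.Set Int) :
    L.foldl (fun sets literal =>
      (PySem.Set.add sets.1 |literal|,
       if literal > 0 then PySem.Set.add sets.2.1 literal else sets.2.1,
       if literal < 0 then PySem.Set.add sets.2.2 (-literal) else sets.2.2)) s
    = (L.foldl (fun t l => PySem.Set.add t |l|) s.1,
       L.foldl (fun t l => if l > 0 then PySem.Set.add t l else t) s.2.1,
       L.foldl (fun t l => if l < 0 then PySem.Set.add t (-l) else t) s.2.2) := by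
  induction L generalizing s with
  | nil => rfl
  | cons l L ih => simp [ih]

theorem mem_foldl_add_if (p : Int → Bool) (f : Int → Int) (x : Int) (L : List Int)
    (s : PySem.Set Int) :
    (x ∈ L.foldl (fun t l => if p l then PySem.Set.add t (f l) else t) s)
    ↔ x ∈ s ∨ ∃ l ∈ L, p l ∧ f l = x := by
  induction L generalizing s with
  | nil => simp
  | cons l L ih =>
    simp only [List.foldl_cons, ih]
    by_cases h : p l <;> simp [h, PySem.Set.mem_add] <;> tauto

theorem pvBuildB_spec (S : List (List Int)) (x : Int) :
    ((x ∈ (pvBuildB S).1 ↔ ∃ l ∈ S.flatten, |l| = x)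
    ∧ (x ∈ (pvBuildB S).2.1 ↔ ∃ l ∈ S.flatten, l > 0 ∧ l = x)
    ∧ (x ∈ (pvBuildB S).2.2 ↔ ∃ l ∈ S.flatten, l < 0 ∧ -l = x)) := by
  unfold pvBuildB
  rw [← List.foldl_flatten, pvBuildB_flat]
  refine ⟨?_, ?_, ?_⟩
  · have := mem_foldl_add_if (fun _ => true) (fun l => |l|) x S.flatten []
    simpa using this
  · have := mem_foldl_add_if (fun l => decide (l > 0)) (fun l => l) x S.flatten []
    simpa using this
  · have := mem_foldl_add_if (fun l => decide (l < 0)) (fun l => -l) x S.flatten []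
    simpa using this

theorem SameSignedLiteral_eq (atoms : List Int) (S : List (List Int)) :
    SameSignedLiteral atoms S = SameSignedLiteral_alt atoms S := by
  induction atoms with
  | nil => rfl
  | cons atom rest ih =>
    have hB := pvBuildB_spec S atom
    rw [SameSignedLiteral]
    show _ = pvLookupB (pvBuildB S) (atom :: rest)
    rw [pvLookupB]
    rw [pvScanA_spec]
    have hP : ((S.flatten).any (fun l => |l| == atom))
        = PySem.Set.contains (pvBuildB S).1 atom := by
      rw [Bool.eq_iff_iff, PySem.Set.contains_iff, hB.1, List.any_eq_true]
      simp only [beq_iff_eq]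
    have hN : ((S.flatten).any (fun l => |l| == atom && decide (l < 0)))
        = PySem.Set.contains (pvBuildB S).2.2 atom := by
      rw [Bool.eq_iff_iff, PySem.Set.contains_iff, hB.2.2, List.any_eq_true]
      simp only [Bool.and_eq_true, beq_iff_eq, decide_eq_true_eq]
      constructor
      · rintro ⟨l, hl, he, hlt⟩
        exact ⟨l, hl, hlt, by rw [← he, abs_of_neg hlt]⟩
      · rintro ⟨l, hl, hlt, he⟩
        exact ⟨l, hl, by rw [← he, abs_of_neg hlt], hlt⟩
    have hPo : ((S.flatten).any (fun l => |l| == atom && decide (l > 0)))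
        = PySem.Set.contains (pvBuildB S).2.1 atom := by
      rw [Bool.eq_iff_iff, PySem.Set.contains_iff, hB.2.1, List.any_eq_true]
      simp only [Bool.and_eq_true, beq_iff_eq, decide_eq_true_eq]
      constructor
      · rintro ⟨l, hl, he, hgt⟩
        exact ⟨l, hl, hgt, by rw [← he, abs_of_pos hgt]⟩
      · rintro ⟨l, hl, hgt, he⟩
        exact ⟨l, hl, by rw [← he, abs_of_pos hgt], hgt⟩
    simp only [hP, hN, hPo]
    cases hp : PySem.Set.contains (pvBuildB S).1 atom <;>
    cases hn : PySem.Set.contains (pvBuildB S).2.2 atom <;>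
    cases hpo : PySem.Set.contains (pvBuildB S).2.1 atom <;>
      simp [ih, SameSignedLiteral_alt]

-- ===== VERDICT (by name: the statement is the Claim_ definition above) =====
theorem SameSignedLiteral_spec : Claim_equal_SameSignedLiteral := by
  intro atoms S _
  unfold Spec_SameSignedLiteral
  exact SameSignedLiteral_eq atoms S
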